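-- pv_equiv track=rewrite | github.com/fdwxfy/Kinesthetic-Coding | 新回归（DC不量化）.py | Intercept
-- ===== SOURCE A (Python) =====
-- length = 8              # 这里要调参
--
-- Inte = 1                # 截取的长度，不能超过length
--
-- def Intercept(arr):
--     in_arr = []
--     n = 0
--     for i in range(len(arr)):
--         n += 1
--         if n < (Inte+1):
--             in_arr.append(arr[i])
--         if n == length:
--             n = 0
--     return in_arr
-- ===== SOURCE B (Python) =====
-- length = 8              # 这里要调参
--
-- Inte = 1                # 截取的长度，不能超过length
--
-- def Intercept(arr):
--     in_arr = []
--     for start in range(0, len(arr), length):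
--         in_arr.extend(arr[start:start + Inte])
--     return in_arr
-- ===== Notes on version B (the rewrite author's own statement) =====
-- stated objective: simpler
-- what changed: B loops over block start indices with range(0, len(arr), length) and slices the first Inte elements of each block, replacing A's element-by-element walk with a cycling reset counter.
import Mathlib
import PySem

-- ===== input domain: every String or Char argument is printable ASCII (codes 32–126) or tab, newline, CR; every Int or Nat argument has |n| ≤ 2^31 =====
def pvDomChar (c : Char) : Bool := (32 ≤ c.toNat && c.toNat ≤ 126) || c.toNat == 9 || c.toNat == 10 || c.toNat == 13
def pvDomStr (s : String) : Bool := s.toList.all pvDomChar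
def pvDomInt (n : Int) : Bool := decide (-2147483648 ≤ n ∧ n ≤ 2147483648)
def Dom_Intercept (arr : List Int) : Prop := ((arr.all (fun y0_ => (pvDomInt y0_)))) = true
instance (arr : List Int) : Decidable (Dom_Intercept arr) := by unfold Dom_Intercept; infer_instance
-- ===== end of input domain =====

-- B keeps the first Inte(=1) element of each length(=8)-sized block by iterating
-- block starts and slicing, instead of A's per-element cycling counter; objective: simpler.

-- module-level constants of the Python file (shared by A and B)
def pyLength : Int := 8
def pyInte : Int := 1

-- ===== PORT A =====
-- loop body of A: n += 1; if n < Inte+1: append arr[i]; if n == length: n = 0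
def stepA (st : List Int × Int) (x : Int) : List Int × Int :=
  let n := st.2 + 1
  let in_arr := if n < (pyInte + 1) then st.1 ++ [x] else st.1
  (in_arr, if n = pyLength then 0 else n)

def Intercept (arr : List Int) : List Int :=
  ((PySem.List.pyRange 0 (arr.length : Int) 1).foldl
      (fun st i => stepA st (PySem.List.pyGetD arr i 0)) ([], 0)).1

-- ===== PORT B =====
def Intercept_alt (arr : List Int) : List Int :=
  (PySem.List.pyRange 0 (arr.length : Int) pyLength).foldl
    (fun in_arr start => in_arr ++ PySem.List.slice arr (some start) (some (start + pyInte))) []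

-- ===== PRECONDITION & SPEC =====
def Spec_Intercept (arr : List Int) (out : List Int) : Prop := out = Intercept_alt arr
instance (arr : List Int) (out : List Int) : Decidable (Spec_Intercept arr out) := by unfold Spec_Intercept; infer_instance

-- ===== CLAIM (what is proved, stated in full; the proofs are below) =====
def Claim_equal_Intercept : Prop := ∀ (arr : List Int), Dom_Intercept arr → Spec_Intercept arr (Intercept arr)

-- ===== LEMMAS AND PROOFS =====

-- the common value: first element of every 8-block, in order
def gsel : List Int → List Int
  | [] => []
  | x :: xs => x :: gsel (xs.drop 7)
termination_by l => l.length
decreasing_by simp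

-- simp equations for gsel (a well-founded definition)
lemma gsel_nil : gsel [] = [] := by rw [gsel]
lemma gsel_cons (x : Int) (xs : List Int) : gsel (x :: xs) = x :: gsel (xs.drop 7) := by rw [gsel]

-- what A's fold computes from counter state k (k = 0 fresh block; 1 ≤ k ≤ 7 mid-block)
def gA (k : Nat) (arr : List Int) : List Int :=
  if k = 0 then gsel arr else gsel (arr.drop (8 - k))

lemma foldA_eq (arr : List Int) : ∀ (acc : List Int) (k : Nat), k ≤ 7 →
    (arr.foldl stepA (acc, (k : Int))).1 = acc ++ gA k arr := by
  induction arr with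
  | nil => intro acc k _; simp only [List.foldl_nil]; unfold gA; split <;> simp [gsel_nil]
  | cons x xs ih =>
    intro acc k hk
    interval_cases k <;>
      simp only [List.foldl_cons, stepA, pyInte, pyLength] <;> norm_num
    · rw [show ((1:Int)) = ((1:Nat):Int) by norm_num, ih (acc ++ [x]) 1 (by omega)]
      simp [gA, gsel_cons]
    · rw [show ((2:Int)) = ((2:Nat):Int) by norm_num, ih acc 2 (by omega)]; simp [gA]
    · rw [show ((3:Int)) = ((3:Nat):Int) by norm_num, ih acc 3 (by omega)]; simp [gA]
    · rw [show ((4:Int)) = ((4:Nat):Int) by norm_num, ih acc 4 (by omega)]; simp [gA]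
    · rw [show ((5:Int)) = ((5:Nat):Int) by norm_num, ih acc 5 (by omega)]; simp [gA]
    · rw [show ((6:Int)) = ((6:Nat):Int) by norm_num, ih acc 6 (by omega)]; simp [gA]
    · rw [show ((7:Int)) = ((7:Nat):Int) by norm_num, ih acc 7 (by omega)]; simp [gA]
    · rw [show ((0:Int)) = ((0:Nat):Int) by norm_num, ih acc 0 (by omega)]; simp [gA]

lemma Intercept_eq_gsel (arr : List Int) : Intercept arr = gsel arr := by
  unfold Intercept
  rw [PySem.List.foldl_pyRange_zero_pyGetD' arr 0 stepA ([], 0)]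
  have := foldA_eq arr [] 0 (by omega)
  simpa [gA] using this

lemma flat_take_eq_gsel : ∀ (arr : List Int),
    (List.range ((arr.length + 7) / 8)).flatMap (fun k => (arr.drop (8 * k)).take 1)
      = gsel arr
  | [] => by simp [gsel_nil]
  | x :: xs => by
    have ih := flat_take_eq_gsel (xs.drop 7)
    have hcnt : ((x :: xs).length + 7) / 8 = ((xs.drop 7).length + 7) / 8 + 1 := by
      have h7 : (xs.drop 7).length = xs.length - 7 := List.length_drop ..
      simp only [List.length_cons, h7]; omega
    rw [hcnt, List.range_succ_eq_map, List.flatMap_cons, List.flatMap_map]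
    have hf : ∀ k : Nat, ((x :: xs).drop (8 * (k + 1))).take 1
        = ((xs.drop 7).drop (8 * k)).take 1 := by
      intro k
      rw [show 8 * (k + 1) = (8 * k + 7) + 1 by ring, List.drop_succ_cons, List.drop_drop,
        Nat.add_comm 7 (8 * k)]
    simp only [Nat.succ_eq_add_one, hf]
    rw [ih]
    simp [gsel_cons]
termination_by arr => arr.length
decreasing_by simp

lemma Intercept_alt_eq_gsel (arr : List Int) : Intercept_alt arr = gsel arr := by
  unfold Intercept_alt
  rw [PySem.List.foldl_append_eq_flatMap, List.nil_append,
    PySem.List.pyRange_of_pos 0 (arr.length : Int) (by norm_num [pyLength])]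
  have hcnt : (if (0:Int) < (arr.length : Int)
      then (((arr.length : Int) - 0 + 8 - 1) / 8).toNat else 0) = (arr.length + 7) / 8 := by
    split <;> omega
  simp only [show pyLength = (8:Int) from rfl]
  rw [hcnt, List.flatMap_map]
  have hf : ∀ k : Nat, PySem.List.slice arr (some (0 + 8 * (k : Int)))
      (some (0 + 8 * (k : Int) + pyInte)) = (arr.drop (8 * k)).take 1 := by
    intro k
    have h1 : (0 + 8 * (k : Int)) = ((8 * k : Nat) : Int) := by push_cast; ring
    rw [h1]
    have h2 : ((8 * k : Nat) : Int) + pyInte = ((8 * k : Nat) : Int) + ((1 : Nat) : Int) := by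
      simp [pyInte]
    rw [h2, PySem.List.slice_natCast_add]
  simp only [hf]
  exact flat_take_eq_gsel arr

-- ===== VERDICT (by name: the statement is the Claim_ definition above) =====
theorem Intercept_spec : Claim_equal_Intercept := by
  intro arr _
  unfold Spec_Intercept
  rw [Intercept_eq_gsel, Intercept_alt_eq_gsel]
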